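-- pv_equiv track=rewrite | github.com/HQkim/algorithm | programmers/2018카카오/뉴스클러스터링.py | make_set
-- ===== SOURCE A (Python) =====
-- def make_set(str):
--     length = len(str)
--     str = str.lower()
--
--     str_list = []
--     for i in range(length-1):
--         if (97 <= ord(str[i]) <= 122 or 65 <= ord(str[i]) <= 90) and (97 <= ord(str[i+1]) <= 122 or 65 <= ord(str[i+1]) <= 90):
--             str_sample = str[i:i+2]
--             str_list.append(str_sample)
--     str_set = set(str_list)
--     return (str_list, str_set)
-- ===== SOURCE B (Python) =====
-- def make_set(str):
--     # B: split the lowercased string into maximal runs of ASCII letters,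
--     # then emit every adjacent pair inside each run (no per-pair letter test).
--     s = str.lower()
--     runs, cur = [], []
--     for c in s:
--         if 'a' <= c <= 'z':
--             cur.append(c)
--         elif cur:
--             runs.append(cur)
--             cur = []
--     if cur:
--         runs.append(cur)
--     str_list = [a + b for r in runs for a, b in zip(r, r[1:])]
--     return (str_list, set(str_list))
-- ===== Notes on version B (the rewrite author's own statement) =====
-- stated objective: alternative
-- what changed: Instead of A's single index loop that re-tests both characters' ord-ranges at every position and slices out each bigram, B first segments the lowercased string into maximal runs of ASCII letters and then emits every adjacent pair inside each run with zip, with no per-pair letter test.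
import Mathlib
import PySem

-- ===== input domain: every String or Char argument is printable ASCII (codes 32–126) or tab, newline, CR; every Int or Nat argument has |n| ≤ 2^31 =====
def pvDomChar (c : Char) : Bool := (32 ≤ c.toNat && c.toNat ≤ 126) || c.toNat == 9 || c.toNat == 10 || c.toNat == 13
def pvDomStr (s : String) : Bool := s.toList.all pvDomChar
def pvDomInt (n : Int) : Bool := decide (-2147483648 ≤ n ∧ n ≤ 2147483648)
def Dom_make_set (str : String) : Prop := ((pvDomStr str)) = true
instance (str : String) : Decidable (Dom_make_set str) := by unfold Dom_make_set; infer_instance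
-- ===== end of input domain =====

-- B splits the lowered string into maximal runs of letters and emits each run's adjacent pairs;
-- A tests both characters' ord-ranges at every index of one fused loop. Same return value.

-- ===== PORT A =====
-- ord(str[i]) range test of A; 'none' is the IndexError guard (unreachable: i ∈ range(len-1))
def pvOrdTest (oc : Option Char) : Bool :=
  match oc with
  | some c => (97 ≤ c.toNat && c.toNat ≤ 122) || (65 ≤ c.toNat && c.toNat ≤ 90)
  | none => false

def make_set (str : String) : List String × List String :=
  let length : Int := PySem.Str.len str
  let s : String := PySem.Str.lower str
  let str_list : List String :=
    (PySem.List.pyRange 0 (length - 1)).foldl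
      (fun acc i =>
        if pvOrdTest (PySem.Str.pyGet? s i) && pvOrdTest (PySem.Str.pyGet? s (i + 1)) then
          acc ++ [PySem.Str.slice s (some i) (some (i + 2))]
        else acc) []
  (str_list, PySem.Set.ofList str_list)

-- ===== PORT B =====
-- 'a' <= c <= 'z' test of Source B
def pvIsLet (c : Char) : Bool := decide ('a' ≤ c) && decide (c ≤ 'z')

-- the run-collecting for-loop of Source B: state (runs, cur)
def pvRunsAux : List Char → List (List Char) → List Char → List (List Char)
  | [], runs, cur => if cur.isEmpty then runs else runs ++ [cur]
  | c :: cs, runs, cur =>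
    if pvIsLet c then pvRunsAux cs runs (cur ++ [c])
    else if cur.isEmpty then pvRunsAux cs runs cur
    else pvRunsAux cs (runs ++ [cur]) []

-- [a + b for a, b in zip(r, r[1:])]
def pvBigrams (r : List Char) : List String :=
  (r.zip r.tail).map (fun p => String.ofList [p.1, p.2])

def make_set_alt (str : String) : List String × List String :=
  let s : String := PySem.Str.lower str
  let runs : List (List Char) := pvRunsAux s.toList [] []
  let str_list : List String := runs.flatMap pvBigrams
  (str_list, PySem.Set.ofList str_list)

-- ===== PRECONDITION & SPEC =====
def Spec_make_set (str : String) (out : List String × List String) : Prop := out = make_set_alt str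
instance (str : String) (out : List String × List String) : Decidable (Spec_make_set str out) := by unfold Spec_make_set; infer_instance

-- ===== CLAIM (what is proved, stated in full; the proofs are below) =====
def Claim_equal_make_set : Prop := ∀ (str : String), Dom_make_set str → Spec_make_set str (make_set str)

-- ===== LEMMAS AND PROOFS =====

-- common reference shape: the filtered adjacent letter-bigrams of a char list
def pvF : List Char → List String
  | a :: b :: t => (if pvIsLet a && pvIsLet b then [String.ofList [a, b]] else []) ++ pvF (b :: t)
  | _ => []

theorem char_le_iff (a b : Char) : (a ≤ b) ↔ (a.toNat ≤ b.toNat) := Iff.rfl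

-- A's ord-range test of the lowered character equals B's 'a'..'z' test (no lowered char has code 65..90)
theorem pv_test_eq (c : Char) :
    pvOrdTest (some (PySem.Chars.lowerChar c)) = pvIsLet (PySem.Chars.lowerChar c) := by
  simp only [pvOrdTest, pvIsLet, PySem.Chars.lowerChar, PySem.Chars.isupper, char_le_iff,
    show 'A'.toNat = 65 from rfl, show 'Z'.toNat = 90 from rfl,
    show 'a'.toNat = 97 from rfl, show 'z'.toNat = 122 from rfl]
  split_ifs with hu
  · simp only [Bool.and_eq_true, decide_eq_true_eq] at hu
    have hv : (Char.ofNat (c.toNat + 32)).toNat = c.toNat + 32 := by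
      have : (c.toNat + 32).isValidChar := Or.inl (by omega)
      simp [Char.ofNat, this]
    rw [hv, Bool.eq_iff_iff]
    simp only [Bool.or_eq_true, Bool.and_eq_true, decide_eq_true_eq]
    omega
  · simp only [Bool.and_eq_true, decide_eq_true_eq, not_and_or, not_le] at hu
    rw [Bool.eq_iff_iff]
    simp only [Bool.or_eq_true, Bool.and_eq_true, decide_eq_true_eq]
    omega

-- A's fold-with-append over pyRange(0, len-1) is a map over a filtered Nat range
theorem pv_shape (str : String) (p : Int → Bool) (f : Int → String) :
    (PySem.List.pyRange 0 (PySem.Str.len str - 1)).foldl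
      (fun acc i => if p i then acc ++ [f i] else acc) []
    = ((List.range (str.toList.length - 1)).filter (fun k : Nat => p (k : Int))).map
        (fun k : Nat => f (k : Int)) := by
  rw [PySem.List.foldl_append_if, PySem.Str.len_eq]
  cases hn : str.toList.length with
  | zero => simp [PySem.List.pyRange]
  | succ m =>
    have h1 : ((m + 1 : Nat) : Int) - 1 = (m : Int) := by push_cast; ring
    rw [h1, PySem.List.pyRange_zero_natCast, List.filter_map, List.map_map]
    simp [Function.comp_def]

-- A's indexed filtered map over the lowered list equals pvF
theorem pvA_eq_F (l : List Char) :
    ((List.range (l.length - 1)).filter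
        (fun k => pvIsLet (l.getD k ' ') && pvIsLet (l.getD (k + 1) ' '))).map
      (fun k => String.ofList [l.getD k ' ', l.getD (k + 1) ' ']) = pvF l := by
  induction l with
  | nil => simp [pvF]
  | cons a l ih =>
    cases l with
    | nil => simp [pvF]
    | cons b t =>
      have hr : List.range (t.length + 1) = 0 :: List.map Nat.succ (List.range t.length) :=
        List.range_succ_eq_map
      simp only [List.length_cons, Nat.add_sub_cancel] at ih ⊢
      rw [hr, List.filter_cons, pvF]
      simp only [List.getD_cons_zero, List.getD_cons_succ]
      by_cases h : (pvIsLet a && pvIsLet b) = true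
      · simp only [h, if_true, List.map_cons, List.filter_map, List.map_map,
          List.singleton_append]
        exact congrArg (List.cons _) ih
      · simp only [h, if_false, Bool.false_eq_true, List.filter_map, List.map_map,
          List.nil_append]
        exact ih

-- a run of letters: its unconditional zip-bigrams are its pvF
theorem pvBigrams_eq_F (r : List Char) (h : ∀ c ∈ r, pvIsLet c = true) :
    pvBigrams r = pvF r := by
  induction r with
  | nil => simp [pvBigrams, pvF]
  | cons a r ih =>
    cases r with
    | nil => simp [pvBigrams, pvF]
    | cons b t =>
      have ha : pvIsLet a = true := h a (by simp)
      have hb : pvIsLet b = true := h b (by simp)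
      rw [pvF]
      simp only [pvBigrams, List.tail_cons, List.zip_cons_cons, List.map_cons, ha, hb,
        Bool.and_self, if_pos, List.singleton_append]
      exact congrArg _ (ih (fun c hc => h c (List.mem_cons_of_mem a hc)))

-- a non-letter separator splits pvF
theorem pvF_sep (c : Char) (hc : pvIsLet c = false) :
    ∀ (xs ys : List Char), pvF (xs ++ c :: ys) = pvF xs ++ pvF ys := by
  intro xs
  induction xs with
  | nil =>
    intro ys
    cases ys with
    | nil => simp [pvF]
    | cons y t => rw [List.nil_append, pvF]; simp [pvF, hc]
  | cons x xs ih =>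
    intro ys
    cases xs with
    | nil =>
      rw [List.cons_append, List.nil_append, pvF]
      simp only [hc, Bool.and_false, Bool.false_eq_true, List.nil_append, if_false]
      simpa using ih ys
    | cons x' t =>
      rw [List.cons_append, List.cons_append, pvF]
      have := ih ys
      rw [List.cons_append] at this
      rw [this, pvF]
      simp [List.append_assoc]

-- loop invariant of Source B's run collector
theorem pvRuns_invariant :
    ∀ (l : List Char) (runs : List (List Char)) (cur : List Char),
      (∀ c ∈ cur, pvIsLet c = true) →
      (pvRunsAux l runs cur).flatMap pvBigrams
        = runs.flatMap pvBigrams ++ pvF (cur ++ l) := by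
  intro l
  induction l with
  | nil =>
    intro runs cur hcur
    rw [pvRunsAux]
    by_cases h : cur.isEmpty
    · rw [if_pos h, List.isEmpty_iff.mp h]
      simp [pvF]
    · rw [if_neg h, List.flatMap_append, List.append_nil]
      simp [pvBigrams_eq_F cur hcur]
  | cons c cs ih =>
    intro runs cur hcur
    rw [pvRunsAux]
    by_cases h : pvIsLet c = true
    · rw [if_pos h]
      have hcur' : ∀ x ∈ cur ++ [c], pvIsLet x = true := by
        intro x hx
        rcases List.mem_append.mp hx with h' | h'
        · exact hcur x h'
        · rw [List.mem_singleton.mp h']; exact h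
      rw [ih runs (cur ++ [c]) hcur']
      simp [List.append_assoc]
    · rw [if_neg h]
      have hc : pvIsLet c = false := by simpa using h
      by_cases he : cur.isEmpty
      · rw [if_pos he, ih runs cur hcur, List.isEmpty_iff.mp he]
        rw [List.nil_append, List.nil_append]
        have := pvF_sep c hc [] cs
        simpa using this.symm
      · rw [if_neg he, ih (runs ++ [cur]) [] (by simp)]
        rw [List.flatMap_append]
        simp only [List.flatMap_cons, List.flatMap_nil, List.append_nil, List.nil_append]
        rw [pvBigrams_eq_F cur hcur, pvF_sep c hc cur cs, List.append_assoc]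

-- ===== VERDICT (by name: the statement is the Claim_ definition above) =====
set_option maxHeartbeats 1000000 in
theorem make_set_spec : Claim_equal_make_set := by
  intro str _
  unfold Spec_make_set make_set make_set_alt
  simp only
  have hlen : (PySem.Str.lower str).toList.length = str.toList.length := by
    rw [PySem.Str.toList_lower]; simp [PySem.Chars.lower]
  set s := PySem.Str.lower str with hs
  set l := s.toList with hl
  rw [pv_shape str _ _]
  -- convert A's filtered map to the getD form, then both sides to pvF l
  have hstep :
      ((List.range (str.toList.length - 1)).filter
          (fun k : Nat => pvOrdTest (PySem.Str.pyGet? s (k : Int)) &&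
            pvOrdTest (PySem.Str.pyGet? s ((k : Int) + 1)))).map
        (fun k : Nat => PySem.Str.slice s (some (k : Int)) (some ((k : Int) + 2)))
      = ((List.range (l.length - 1)).filter
          (fun k => pvIsLet (l.getD k ' ') && pvIsLet (l.getD (k + 1) ' '))).map
        (fun k => String.ofList [l.getD k ' ', l.getD (k + 1) ' ']) := by
    have hlen' : l.length = str.toList.length := by rw [hl, hs]; exact hlen
    have hget : ∀ k : Nat, k < l.length → pvOrdTest (PySem.Str.pyGet? s (k : Int)) = pvIsLet (l.getD k ' ') := by
      intro k hk
      rw [PySem.Str.pyGet?_natCast, ← hl, List.getElem?_eq_getElem hk, List.getD,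
        List.getElem?_eq_getElem hk, Option.getD_some]
      have : l[k] = PySem.Chars.lowerChar (str.toList[k]'(by omega)) := by
        simp [hl, hs, PySem.Str.toList_lower, PySem.Chars.lower]
      rw [this, pv_test_eq]
    rw [hlen']
    rw [List.filter_congr (fun k hk => by
      have hkr : k < str.toList.length - 1 := List.mem_range.mp hk
      have h1 : ((k : Int) + 1) = ((k + 1 : Nat) : Int) := by push_cast; ring
      rw [h1, hget k (by omega), hget (k + 1) (by omega)])]
    refine List.map_congr_left (fun k hk => ?_)
    have hkr : k < str.toList.length - 1 := List.mem_range.mp (List.mem_of_mem_filter hk)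
    have hkk : k + 1 < l.length := by omega
    apply String.toList_inj.mp
    have h2 : ((k : Int) + 2) = ((k : Int) + ((2 : Nat) : Int)) := by push_cast; ring
    rw [h2, PySem.Str.toList_slice, PySem.Chars.slice_eq_listSlice, ← hl,
      PySem.List.slice_natCast_add, String.toList_ofList]
    rw [List.drop_eq_getElem_cons (show k < l.length by omega)]
    rw [List.drop_eq_getElem_cons hkk]
    rw [List.take_succ_cons, List.take_succ_cons, List.take_zero]
    simp [List.getD, List.getElem?_eq_getElem (show k < l.length by omega),
      List.getElem?_eq_getElem hkk]
  rw [hstep, pvA_eq_F]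
  have hB := pvRuns_invariant l [] [] (by simp)
  rw [List.nil_append] at hB
  simp only [List.flatMap_nil, List.nil_append] at hB
  rw [hB]
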